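-- pv_equiv track=rewrite | github.com/Jonathan-Llovet/NodesAndEdges | find_graph_edges.py | find_inner_edges
-- ===== SOURCE A (Python) =====
-- def find_inner_edges(nodes):
--     '''Returns the number of inner edges in graph containing specified number of nodes,
--     where there is a single connection between every pair of nodes.
--     Inner edges here are the edges connecting non-adjacent nodes in a polygon.
--     For a simple geometrical case, the diagonals of a quadrilateral are inner edges.'''
--     if nodes < 3:
--         inner_edges = 0
--         return inner_edges
--     elif nodes == 4:
--         inner_edges = 2
--         return inner_edges
--     else:
--         m = nodes - 3
--         inner_edges = m
--         while m > 0: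
--             inner_edges += m
--             m -= 1
--         return inner_edges
-- ===== SOURCE B (Python) =====
-- def find_inner_edges(nodes):
--     '''Returns the number of inner edges (diagonals) in a polygon with the
--     specified number of nodes, via the closed form n*(n-3)//2.'''
--     if nodes < 3:
--         return 0
--     return nodes * (nodes - 3) // 2
-- ===== Notes on version B (the rewrite author's own statement) =====
-- stated objective: faster
-- what changed: Replaces the counting-down while loop over m=nodes-3 with the closed-form diagonal count nodes*(nodes-3)//2.
import Mathlib
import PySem

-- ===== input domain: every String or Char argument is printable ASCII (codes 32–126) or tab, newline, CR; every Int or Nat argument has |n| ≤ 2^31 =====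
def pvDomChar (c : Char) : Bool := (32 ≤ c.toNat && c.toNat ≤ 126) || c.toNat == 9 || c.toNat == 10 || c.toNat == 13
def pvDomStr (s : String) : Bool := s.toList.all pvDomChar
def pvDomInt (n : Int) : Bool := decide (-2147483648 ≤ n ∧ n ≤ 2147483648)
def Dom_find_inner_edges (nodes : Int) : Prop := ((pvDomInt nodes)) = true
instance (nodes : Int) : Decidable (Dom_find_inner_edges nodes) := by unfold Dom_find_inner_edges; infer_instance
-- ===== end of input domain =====

-- B replaces A's counting-down while loop with the closed form nodes*(nodes-3)//2 (faster).

-- ===== PORT A =====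
-- A's while loop 'while m > 0: inner += m; m -= 1'; in the else branch m = nodes-3 ≥ 0,
-- so the loop is structural recursion on m's value as a Nat.
def pvLoopA : Nat → Int → Int
  | 0, inner => inner
  | Nat.succ k, inner => pvLoopA k (inner + (Nat.succ k : Int))

def find_inner_edges (nodes : Int) : Int :=
  if nodes < 3 then 0
  else if nodes = 4 then 2
  else
    let m := nodes - 3
    pvLoopA m.toNat m

-- ===== PORT B =====
def find_inner_edges_alt (nodes : Int) : Int :=
  if nodes < 3 then 0
  else PySem.Int.floordiv (nodes * (nodes - 3)) 2

-- ===== PRECONDITION & SPEC =====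
def Spec_find_inner_edges (nodes : Int) (out : Int) : Prop := out = find_inner_edges_alt nodes
instance (nodes : Int) (out : Int) : Decidable (Spec_find_inner_edges nodes out) := by unfold Spec_find_inner_edges; infer_instance

-- ===== CLAIM (what is proved, stated in full; the proofs are below) =====
def Claim_equal_find_inner_edges : Prop := ∀ (nodes : Int), Dom_find_inner_edges nodes → Spec_find_inner_edges nodes (find_inner_edges nodes)

-- ===== LEMMAS AND PROOFS =====

-- The loop adds k + (k-1) + … + 1 to the accumulator.
theorem pvLoopA_eq (k : Nat) (inner : Int) :
    pvLoopA k inner = inner + ((k * (k + 1) / 2 : Nat) : Int) := by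
  induction k generalizing inner with
  | zero => simp [pvLoopA]
  | succ n ih =>
      rw [pvLoopA, ih]
      have h : (n + 1) * (n + 1 + 1) / 2 = n * (n + 1) / 2 + (n + 1) := by
        have h1 : (n + 1) * (n + 1 + 1) = n * (n + 1) + (n + 1) * 2 := by ring
        rw [h1, Nat.add_mul_div_right _ _ (by norm_num : 0 < 2)]
      rw [h]
      push_cast
      ring

-- ===== VERDICT (by name: the statement is the Claim_ definition above) =====
theorem find_inner_edges_spec : Claim_equal_find_inner_edges := by
  intro nodes _
  unfold Spec_find_inner_edges find_inner_edges find_inner_edges_alt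
  by_cases h3 : nodes < 3
  · simp [h3]
  · simp only [h3, if_false]
    have h2 : (0:Int) < 2 := by norm_num
    rw [PySem.Int.floordiv_eq_ediv_of_pos h2]
    by_cases h4 : nodes = 4
    · subst h4; decide
    · simp only [h4, if_false]
      have hm : 0 ≤ nodes - 3 := by omega
      set k : Nat := (nodes - 3).toNat with hk
      have hkk : (k : Int) = nodes - 3 := Int.toNat_of_nonneg hm
      rw [pvLoopA_eq]
      have hdvd : 2 ∣ k * (k + 1) := (Nat.even_mul_succ_self k).two_dvd
      have hnat : k * (k + 1) / 2 * 2 = k * (k + 1) := Nat.div_mul_cancel hdvd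
      have hx : nodes * (nodes - 3) = 2 * ((nodes - 3) + ((k * (k + 1) / 2 : Nat) : Int)) := by
        have hc : ((k * (k + 1) : Nat) : Int) = (k : Int) * ((k : Int) + 1) := by push_cast; ring
        have h2d : ((k * (k + 1) : Nat) : Int) = 2 * (((k * (k + 1) / 2 : Nat) : Int)) := by
          exact_mod_cast (by omega : k * (k + 1) = 2 * (k * (k + 1) / 2))
        have hkey : (k : Int) * ((k : Int) + 1) = 2 * (((k * (k + 1) / 2 : Nat) : Int)) := by
          rw [← hc]; exact h2d
        have : nodes * (nodes - 3) = 2 * (nodes - 3) + (k : Int) * ((k : Int) + 1) := by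
          rw [hkk]; ring
        rw [this, hkey]; ring
      rw [hx, Int.mul_ediv_cancel_left _ (by norm_num : (2:Int) ≠ 0)]
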